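-- pv_equiv track=rewrite | github.com/davidlyness/Advent-of-Code-2015 | 25/25.py | calculate
-- ===== SOURCE A (Python) =====
-- import collections
--
-- def calculate(target_row, target_column):
--     """
--     Calculates the number present in the specified grid position.
--     :param target_row: specified row
--     :param target_column: specified column
--     :return: value at co-ordinate (target_row, target_column)
--     """
--     grid = collections.defaultdict(dict)
--     grid[1][1] = 20151125
--     current_row, current_column = 1, 1
--     while (current_row != target_row) or (current_column != target_column):
--         previous_row, previous_column = current_row, current_column
--         if previous_row == 1:
--             current_row, current_column = previous_column + 1, 1
--         else:
--             current_row, current_column = previous_row - 1, previous_column + 1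
--         grid[current_row][current_column] = (grid[previous_row][previous_column] * 252533) % 33554393
--
--     return grid[target_row][target_column]
-- ===== SOURCE B (Python) =====
-- def calculate(target_row, target_column):
--     diagonal = target_row + target_column - 2
--     k = diagonal * (diagonal + 1) // 2 + (target_column - 1)
--     return (20151125 * pow(252533, k, 33554393)) % 33554393
-- ===== Notes on version B (the rewrite author's own statement) =====
-- stated objective: faster
-- what changed: Replaces the step-by-step diagonal walk (one modular multiplication per grid cell) by the closed-form 1-based diagonal index of (row, column) and one modular exponentiation via pow(b, e, m).
-- outside the precondition, e.g. on calculate(0, 5): A does not finish within the time limit, B returns 77061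
import Mathlib
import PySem

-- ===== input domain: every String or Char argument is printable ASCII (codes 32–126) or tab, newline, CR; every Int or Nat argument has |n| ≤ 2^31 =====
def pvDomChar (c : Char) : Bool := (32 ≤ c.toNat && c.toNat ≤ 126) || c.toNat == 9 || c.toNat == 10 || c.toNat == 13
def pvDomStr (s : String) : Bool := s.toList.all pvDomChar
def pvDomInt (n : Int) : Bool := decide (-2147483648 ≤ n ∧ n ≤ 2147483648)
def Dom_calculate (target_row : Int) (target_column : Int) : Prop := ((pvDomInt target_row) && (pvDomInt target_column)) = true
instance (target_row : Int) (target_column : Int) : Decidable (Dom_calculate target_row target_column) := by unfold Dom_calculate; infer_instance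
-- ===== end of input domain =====

-- B replaces A's cell-by-cell diagonal walk by a closed-form index plus one modular exponentiation.
-- (A mutates only its local dict; no observable side effects.)

-- ===== PORT A =====
-- A's while-loop. Python's grid dict only ever reads the cell written on the previous
-- iteration, so the loop state is (current_row, current_column, value of the current cell);
-- the fuel is exactly the number of iterations the Python loop performs when it terminates
-- (under Pre_ below); when the fuel runs out the Python loop would run forever.
def calcLoopA (tr tc : Int) : Nat → Int → Int → Int → Int
  | fuel, r, c, v =>
    if r = tr ∧ c = tc then v
    else
      match fuel with
      | 0 => v
      | n+1 =>
        if r = 1 then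
          calcLoopA tr tc n (c + 1) 1 (PySem.Int.mod (v * 252533) 33554393)
        else
          calcLoopA tr tc n (r - 1) (c + 1) (PySem.Int.mod (v * 252533) 33554393)

def calculate (target_row : Int) (target_column : Int) : Int :=
  calcLoopA target_row target_column
    ((PySem.Int.floordiv ((target_row + target_column - 2) * (target_row + target_column - 1)) 2
        + target_column - 1).toNat)
    1 1 20151125

-- ===== PORT B =====
def calculate_alt (target_row : Int) (target_column : Int) : Int :=
  let diagonal := target_row + target_column - 2
  let k := PySem.Int.floordiv (diagonal * (diagonal + 1)) 2 + (target_column - 1)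
  PySem.Int.mod (20151125 * PySem.Int.powMod 252533 k.toNat 33554393) 33554393

-- ===== PRECONDITION & SPEC =====
-- Pre_ excludes exactly the inputs (row < 1 or column < 1) on which A's while-loop never
-- reaches the target coordinate and so never returns (the program diverges).
def Pre_calculate (target_row : Int) (target_column : Int) : Prop :=
  1 ≤ target_row ∧ 1 ≤ target_column
instance (target_row : Int) (target_column : Int) : Decidable (Pre_calculate target_row target_column) := by unfold Pre_calculate; infer_instance

def pvWitness_calculate : Int × Int := (3, 4)

def Spec_calculate (target_row : Int) (target_column : Int) (out : Int) : Prop := out = calculate_alt target_row target_column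
instance (target_row : Int) (target_column : Int) (out : Int) : Decidable (Spec_calculate target_row target_column out) := by unfold Spec_calculate; infer_instance

-- ===== CLAIM (what is proved, stated in full; the proofs are below) =====
def Claim_equal_calculate : Prop := ∀ (target_row : Int) (target_column : Int), Dom_calculate target_row target_column → Pre_calculate target_row target_column → Spec_calculate target_row target_column (calculate target_row target_column)

-- ===== LEMMAS AND PROOFS =====

-- The 1-based diagonal enumeration index (doubled, to stay division-free) is injective
-- on the quadrant row, column ≥ 1.
lemma pv_idx2_inj {r c tr tc : Int} (hr : 1 ≤ r) (hc : 1 ≤ c) (htr : 1 ≤ tr) (htc : 1 ≤ tc)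
    (h : (r + c - 2) * (r + c - 1) + 2 * c = (tr + tc - 2) * (tr + tc - 1) + 2 * tc) :
    r = tr ∧ c = tc := by
  have hs : r + c = tr + tc := by
    by_contra hne
    rcases lt_or_gt_of_ne hne with hlt | hgt
    · nlinarith
    · nlinarith
  rw [hs] at h
  constructor <;> [omega; linarith]

-- Each iteration of A's loop advances the doubled diagonal index by exactly 2; if the
-- target lies exactly n steps ahead, the loop performs n modular multiplications.
lemma pv_loop_eq (tr tc : Int) (htr : 1 ≤ tr) (htc : 1 ≤ tc) :
    ∀ (n : Nat) (r c v : Int), 1 ≤ r → 1 ≤ c →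
      (tr + tc - 2) * (tr + tc - 1) + 2 * tc = (r + c - 2) * (r + c - 1) + 2 * c + 2 * n →
      calcLoopA tr tc n r c v
        = if n = 0 then v else PySem.Int.mod (v * 252533 ^ n) 33554393 := by
  intro n
  induction n with
  | zero =>
    intro r c v hr hc hidx
    obtain ⟨h1, h2⟩ := pv_idx2_inj hr hc htr htc (by push_cast at hidx; linarith)
    rw [calcLoopA]
    simp [h1, h2]
  | succ n ih =>
    intro r c v hr hc hidx
    have hne : ¬(r = tr ∧ c = tc) := by
      rintro ⟨rfl, rfl⟩
      push_cast at hidx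
      linarith
    have hM : (0:Int) < 33554393 := by norm_num
    rw [calcLoopA]
    simp only [hne, if_false]
    have key : ∀ r' c' : Int, 1 ≤ r' → 1 ≤ c' →
        (r' + c' - 2) * (r' + c' - 1) + 2 * c' = (r + c - 2) * (r + c - 1) + 2 * c + 2 →
        calcLoopA tr tc n r' c' (PySem.Int.mod (v * 252533) 33554393)
          = PySem.Int.mod (v * 252533 ^ (n + 1)) 33554393 := by
      intro r' c' hr' hc' hadv
      rw [ih r' c' _ hr' hc' (by push_cast at hidx ⊢; linarith)]
      rw [PySem.Int.mod_eq_emod_of_pos hM, PySem.Int.mod_eq_emod_of_pos hM]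
      rcases Nat.eq_zero_or_pos n with hn0 | hn1
      · subst hn0; simp
      · rw [if_neg (Nat.pos_iff_ne_zero.mp hn1), PySem.Int.mod_eq_emod_of_pos hM]
        rw [Int.mul_emod, Int.emod_emod_of_dvd _ (dvd_refl _)]
        rw [← Int.mul_emod, pow_succ]
        ring_nf
    by_cases h1 : r = 1
    · rw [if_pos h1]
      exact key (c + 1) 1 (by linarith) le_rfl (by subst h1; ring)
    · rw [if_neg h1]
      exact key (r - 1) (c + 1) (by omega) (by linarith) (by ring)

-- ===== VERDICT (by name: the statement is the Claim_ definition above) =====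
theorem calculate_spec : Claim_equal_calculate := by
  intro tr tc _ hpre
  obtain ⟨htr, htc⟩ := hpre
  unfold Spec_calculate calculate calculate_alt
  set m : Int := tr + tc - 2 with hm
  have hm0 : 0 ≤ m := by omega
  have hdvd : (2:Int) ∣ m * (m + 1) := (Int.even_mul_succ_self m).two_dvd
  have hfd : PySem.Int.floordiv (m * (m + 1)) 2 = m * (m + 1) / 2 :=
    PySem.Int.floordiv_eq_ediv_of_pos (by norm_num)
  have hexact : m * (m + 1) / 2 * 2 = m * (m + 1) := Int.ediv_mul_cancel hdvd
  have hq0 : 0 ≤ m * (m + 1) / 2 := Int.ediv_nonneg (by nlinarith) (by norm_num)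
  have hkA : (0:Int) ≤ PySem.Int.floordiv (m * (m + 1)) 2 + tc - 1 := by
    rw [hfd]; omega
  -- the two fuel / exponent expressions are the same natural number
  have hfuel : (PySem.Int.floordiv ((tr + tc - 2) * (tr + tc - 1)) 2 + tc - 1).toNat
      = (PySem.Int.floordiv (m * (m + 1)) 2 + (tc - 1)).toNat := by
    congr 1
    rw [hm]
    ring_nf
  set n : Nat := (PySem.Int.floordiv (m * (m + 1)) 2 + (tc - 1)).toNat with hn
  have hcast : (n : Int) = m * (m + 1) / 2 + tc - 1 := by
    rw [hn, Int.toNat_of_nonneg (by rw [hfd] at hkA ⊢; omega), hfd]; ring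
  have hidx : (tr + tc - 2) * (tr + tc - 1) + 2 * tc
      = (1 + 1 - 2) * (1 + 1 - 1) + 2 * 1 + 2 * (n : Int) := by
    rw [hcast]
    have : 2 * (m * (m + 1) / 2) = m * (m + 1) := by omega
    rw [hm] at *
    ring_nf
    ring_nf at this
    omega
  rw [hfuel, pv_loop_eq tr tc htr htc n 1 1 20151125 le_rfl le_rfl hidx]
  have hM : (0:Int) < 33554393 := by norm_num
  show (if n = 0 then (20151125:Int) else PySem.Int.mod (20151125 * 252533 ^ n) 33554393)
      = PySem.Int.mod (20151125 * PySem.Int.powMod 252533 n 33554393) 33554393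
  rw [show PySem.Int.powMod 252533 n 33554393 = PySem.Int.mod (252533 ^ n) 33554393 from rfl,
      PySem.Int.mod_eq_emod_of_pos hM, PySem.Int.mod_eq_emod_of_pos hM]
  rcases Nat.eq_zero_or_pos n with h0 | hpos
  · rw [if_pos h0, h0, PySem.Int.mod_eq_emod_of_pos hM]
    norm_num
  · rw [if_neg (Nat.pos_iff_ne_zero.mp hpos), PySem.Int.mod_eq_emod_of_pos hM,
        Int.mul_emod 20151125]
    norm_num
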